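-- pv_equiv track=rewrite | github.com/johan-van-eycken/eve-online-industry-tracker | src/eve_online_industry_tracker/application/industry/service.py | _classify_industry_modifier_attribute
-- ===== SOURCE A (Python) =====
-- def _classify_industry_modifier_attribute(attribute_name: str) -> tuple[str | None, str]:
--     normalized = str(attribute_name or "").strip().lower()
--     if not normalized:
--         return None, "other"
--
--     if "manufact" in normalized:
--         activity = "manufacturing"
--     elif "invent" in normalized:
--         activity = "invention"
--     elif "copy" in normalized:
--         activity = "copying"
--     elif "research" in normalized and "material" in normalized:
--         activity = "research_me"
--     elif "research" in normalized and "time" in normalized: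
--         activity = "research_te"
--     elif "research" in normalized:
--         activity = "research"
--     else:
--         activity = None
--
--     if any(token in normalized for token in ["material", "efficiency", "waste"]):
--         metric = "material"
--     elif any(token in normalized for token in ["time", "duration"]):
--         metric = "time"
--     elif any(token in normalized for token in ["cost", "installation", "isk"]):
--         metric = "cost"
--     else:
--         metric = "other"
--
--     return activity, metric
-- ===== SOURCE B (Python) =====
-- _TOKENS = ("manufact", "invent", "copy", "research", "material", "time",
--            "efficiency", "waste", "duration", "cost", "installation", "isk")
--
--
-- def _classify_industry_modifier_attribute(attribute_name: str) -> tuple: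
--     normalized = str(attribute_name or "").strip().lower()
--     if not normalized:
--         return None, "other"
--
--     # Single left-to-right scan: at each position record every token that
--     # starts there, producing a flag set; classification is then pure flag logic.
--     found = set()
--     for i in range(len(normalized)):
--         for tok in _TOKENS:
--             if normalized.startswith(tok, i):
--                 found.add(tok)
--
--     if "manufact" in found:
--         activity = "manufacturing"
--     elif "invent" in found:
--         activity = "invention"
--     elif "copy" in found:
--         activity = "copying"
--     elif "research" in found:
--         if "material" in found:
--             activity = "research_me"
--         elif "time" in found:
--             activity = "research_te"
--         else:
--             activity = "research"
--     else:
--         activity = None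
--
--     if found & {"material", "efficiency", "waste"}:
--         metric = "material"
--     elif found & {"time", "duration"}:
--         metric = "time"
--     elif found & {"cost", "installation", "isk"}:
--         metric = "cost"
--     else:
--         metric = "other"
--
--     return activity, metric
-- ===== Notes on version B (the rewrite author's own statement) =====
-- stated objective: alternative
-- what changed: B replaces A's per-token substring membership searches with one left-to-right scan over the string that collects a flag set of every token starting at each position, then classifies by pure flag logic (nested research branch, set-intersection metric tests).
import Mathlib
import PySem

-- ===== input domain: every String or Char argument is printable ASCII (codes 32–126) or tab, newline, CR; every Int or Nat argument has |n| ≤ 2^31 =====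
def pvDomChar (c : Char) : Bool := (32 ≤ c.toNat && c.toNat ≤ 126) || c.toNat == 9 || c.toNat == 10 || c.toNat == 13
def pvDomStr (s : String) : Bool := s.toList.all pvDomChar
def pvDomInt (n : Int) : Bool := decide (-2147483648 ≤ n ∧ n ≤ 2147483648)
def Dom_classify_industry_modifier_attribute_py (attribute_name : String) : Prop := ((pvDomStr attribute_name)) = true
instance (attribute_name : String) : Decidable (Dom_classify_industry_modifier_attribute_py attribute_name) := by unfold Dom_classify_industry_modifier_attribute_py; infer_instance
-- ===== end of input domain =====

-- B replaces the per-token substring searches by a single positional scan collecting a token flag set, then classifies by flag logic (alternative; same cost).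

-- ===== PORT A =====
def classify_industry_modifier_attribute_py (attribute_name : String) : Option String × String :=
  let normalized := PySem.Str.lower (PySem.Str.strip attribute_name)
  if normalized = "" then (none, "other")
  else
    let activity : Option String :=
      if PySem.Str.isIn "manufact" normalized then some "manufacturing"
      else if PySem.Str.isIn "invent" normalized then some "invention"
      else if PySem.Str.isIn "copy" normalized then some "copying"
      else if PySem.Str.isIn "research" normalized && PySem.Str.isIn "material" normalized then some "research_me"
      else if PySem.Str.isIn "research" normalized && PySem.Str.isIn "time" normalized then some "research_te"
      else if PySem.Str.isIn "research" normalized then some "research"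
      else none
    let metric : String :=
      if (["material", "efficiency", "waste"].any (fun t => PySem.Str.isIn t normalized)) then "material"
      else if (["time", "duration"].any (fun t => PySem.Str.isIn t normalized)) then "time"
      else if (["cost", "installation", "isk"].any (fun t => PySem.Str.isIn t normalized)) then "cost"
      else "other"
    (activity, metric)

-- ===== PORT B =====
def pvTokens : List String :=
  ["manufact", "invent", "copy", "research", "material", "time",
   "efficiency", "waste", "duration", "cost", "installation", "isk"]

-- the scan of Source B: for i in range(len(normalized)): for tok in _TOKENS: if normalized.startswith(tok, i): found.add(tok)
-- (normalized.startswith(tok, i) with 0 ≤ i is exactly: tok is a prefix of the string dropped by i)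
def pvFound (cs : List Char) : PySem.Set String :=
  (List.range cs.length).foldl
    (fun s i =>
      pvTokens.foldl
        (fun s tok => if PySem.Chars.startswith (cs.drop i) tok.toList then PySem.Set.add s tok else s)
        s)
    PySem.Set.empty

def classify_industry_modifier_attribute_py_alt (attribute_name : String) : Option String × String :=
  let normalized := PySem.Str.lower (PySem.Str.strip attribute_name)
  if normalized = "" then (none, "other")
  else
    let found := pvFound normalized.toList
    let activity : Option String :=
      if PySem.Set.contains found "manufact" then some "manufacturing"
      else if PySem.Set.contains found "invent" then some "invention"
      else if PySem.Set.contains found "copy" then some "copying"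
      else if PySem.Set.contains found "research" then
        (if PySem.Set.contains found "material" then some "research_me"
         else if PySem.Set.contains found "time" then some "research_te"
         else some "research")
      else none
    let metric : String :=
      if (PySem.Set.inter found ["material", "efficiency", "waste"]) ≠ [] then "material"
      else if (PySem.Set.inter found ["time", "duration"]) ≠ [] then "time"
      else if (PySem.Set.inter found ["cost", "installation", "isk"]) ≠ [] then "cost"
      else "other"
    (activity, metric)

-- ===== PRECONDITION & SPEC =====
def Spec_classify_industry_modifier_attribute_py (attribute_name : String) (out : Option String × String) : Prop := out = classify_industry_modifier_attribute_py_alt attribute_name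
instance (attribute_name : String) (out : Option String × String) : Decidable (Spec_classify_industry_modifier_attribute_py attribute_name out) := by unfold Spec_classify_industry_modifier_attribute_py; infer_instance

-- ===== CLAIM =====
def Claim_equal_classify_industry_modifier_attribute_py : Prop := ∀ (attribute_name : String), Dom_classify_industry_modifier_attribute_py attribute_name → Spec_classify_industry_modifier_attribute_py attribute_name (classify_industry_modifier_attribute_py attribute_name)

-- ===== LEMMAS AND PROOFS =====
theorem mem_inner_fold (ts : List String) (s : PySem.Set String) (d : List Char) (tok : String) :
    tok ∈ ts.foldl
        (fun s t => if PySem.Chars.startswith d t.toList then PySem.Set.add s t else s) s ↔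
      tok ∈ s ∨ (tok ∈ ts ∧ PySem.Chars.startswith d tok.toList = true) := by
  induction ts generalizing s with
  | nil => simp
  | cons t ts ih =>
    simp only [List.foldl_cons]
    by_cases h : PySem.Chars.startswith d t.toList = true
    · rw [if_pos h, ih]
      simp only [PySem.Set.mem_add, List.mem_cons]
      constructor
      · rintro (⟨hs | rfl⟩ | ⟨hm, hp⟩)
        · exact Or.inl hs
        · exact Or.inr ⟨Or.inl rfl, h⟩
        · exact Or.inr ⟨Or.inr hm, hp⟩
      · rintro (hs | ⟨(rfl | hm), hp⟩)
        · exact Or.inl (Or.inl hs)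
        · exact Or.inl (Or.inr rfl)
        · exact Or.inr ⟨hm, hp⟩
    · rw [if_neg h, ih]
      simp only [List.mem_cons]
      constructor
      · rintro (hs | ⟨hm, hp⟩)
        · exact Or.inl hs
        · exact Or.inr ⟨Or.inr hm, hp⟩
      · rintro (hs | ⟨(rfl | hm), hp⟩)
        · exact Or.inl hs
        · exact absurd hp h
        · exact Or.inr ⟨hm, hp⟩

theorem mem_found_fold (cs : List Char) (l : List Nat) (s : PySem.Set String) (tok : String) :
    tok ∈ l.foldl
        (fun s i =>
          pvTokens.foldl
            (fun s t => if PySem.Chars.startswith (cs.drop i) t.toList then PySem.Set.add s t else s) s)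
        s ↔
      tok ∈ s ∨ (tok ∈ pvTokens ∧ ∃ i ∈ l, tok.toList <+: cs.drop i) := by
  induction l generalizing s with
  | nil => simp
  | cons i l ih =>
    simp only [List.foldl_cons, ih, mem_inner_fold, List.mem_cons]
    constructor
    · rintro ((hs | ⟨hm, hp⟩) | ⟨hm, j, hj, hp⟩)
      · exact Or.inl hs
      · exact Or.inr ⟨hm, i, Or.inl rfl, (PySem.Chars.startswith_iff _ _).mp hp⟩
      · exact Or.inr ⟨hm, j, Or.inr hj, hp⟩
    · rintro (hs | ⟨hm, j, (rfl | hj), hp⟩)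
      · exact Or.inl (Or.inl hs)
      · exact Or.inl (Or.inr ⟨hm, (PySem.Chars.startswith_iff _ _).mpr hp⟩)
      · exact Or.inr ⟨hm, j, hj, hp⟩

theorem contains_iff_mem_set (s : PySem.Set String) (t : String) :
    PySem.Set.contains s t = true ↔ t ∈ s := by
  simp [PySem.Set.contains]

-- for a nonempty token of the token table, the scan's flag equals Python's 'tok in normalized'
theorem contains_pvFound (cs : List Char) (tok : String)
    (hm : tok ∈ pvTokens) (hne : tok.toList ≠ []) :
    PySem.Set.contains (pvFound cs) tok = PySem.Chars.isIn tok.toList cs := by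
  have hmem : tok ∈ pvFound cs ↔ ∃ j, tok.toList <+: cs.drop j := by
    unfold pvFound
    rw [mem_found_fold]
    simp only [PySem.Set.empty, List.not_mem_nil, false_or, hm, true_and]
    constructor
    · rintro ⟨i, _, hp⟩; exact ⟨i, hp⟩
    · rintro ⟨j, hp⟩
      by_cases hj : j < cs.length
      · exact ⟨j, List.mem_range.mpr hj, hp⟩
      · exfalso
        rw [List.drop_eq_nil_of_le (le_of_not_gt hj)] at hp
        exact hne (List.prefix_nil.mp hp)
  apply Bool.eq_iff_iff.mpr
  rw [contains_iff_mem_set, hmem]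
  exact PySem.Chars.exists_prefix_drop_iff_isIn tok.toList cs

-- nonemptiness of the intersection = some listed token is a member
theorem inter_ne_nil_iff (s : PySem.Set String) (ts : List String) :
    (PySem.Set.inter s ts ≠ []) ↔ ∃ t ∈ ts, t ∈ s := by
  simp only [PySem.Set.inter]
  constructor
  · intro h
    obtain ⟨x, hx⟩ := List.exists_mem_of_ne_nil _ h
    have hf := List.mem_filter.mp hx
    exact ⟨x, (contains_iff_mem_set _ _).mp hf.2, hf.1⟩
  · rintro ⟨t, ht, hs⟩
    intro hnil
    have : t ∈ List.filter (fun x => PySem.Set.contains ts x) s :=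
      List.mem_filter.mpr ⟨hs, (contains_iff_mem_set _ _).mpr ht⟩
    rw [hnil] at this
    exact List.not_mem_nil this

-- ===== VERDICT =====
theorem classify_industry_modifier_attribute_py_spec : Claim_equal_classify_industry_modifier_attribute_py := by
  intro s _
  unfold Spec_classify_industry_modifier_attribute_py
  simp only [classify_industry_modifier_attribute_py, classify_industry_modifier_attribute_py_alt]
  set n := PySem.Str.lower (PySem.Str.strip s) with hn
  split
  · rfl
  · have key : ∀ tok : String, tok ∈ pvTokens → tok.toList ≠ [] →
        PySem.Set.contains (pvFound n.toList) tok = PySem.Str.isIn tok n := by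
      intro tok hm hne
      rw [contains_pvFound n.toList tok hm hne]
      simp [PySem.Str.isIn]
    have hman := key "manufact" (by simp [pvTokens]) (by decide)
    have hinv := key "invent" (by simp [pvTokens]) (by decide)
    have hcop := key "copy" (by simp [pvTokens]) (by decide)
    have hres := key "research" (by simp [pvTokens]) (by decide)
    have hmat := key "material" (by simp [pvTokens]) (by decide)
    have htim := key "time" (by simp [pvTokens]) (by decide)
    have heff := key "efficiency" (by simp [pvTokens]) (by decide)
    have hwas := key "waste" (by simp [pvTokens]) (by decide)
    have hdur := key "duration" (by simp [pvTokens]) (by decide)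
    have hcos := key "cost" (by simp [pvTokens]) (by decide)
    have hins := key "installation" (by simp [pvTokens]) (by decide)
    have hisk := key "isk" (by simp [pvTokens]) (by decide)
    have hintm : ((PySem.Set.inter (pvFound n.toList) ["material", "efficiency", "waste"] ≠ []) : Prop) ↔
        (PySem.Str.isIn "material" n || (PySem.Str.isIn "efficiency" n || PySem.Str.isIn "waste" n)) = true := by
      rw [inter_ne_nil_iff]
      simp only [List.mem_cons, List.not_mem_nil, Bool.or_eq_true]
      constructor
      · rintro ⟨t, ht, hs⟩
        rcases ht with rfl | rfl | rfl | h
        · exact Or.inl (by rw [← hmat]; exact (contains_iff_mem_set _ _).mpr hs)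
        · exact Or.inr (Or.inl (by rw [← heff]; exact (contains_iff_mem_set _ _).mpr hs))
        · exact Or.inr (Or.inr (by rw [← hwas]; exact (contains_iff_mem_set _ _).mpr hs))
        · cases h
      · rintro (h | h | h)
        · exact ⟨"material", by simp, (contains_iff_mem_set _ _).mp (hmat ▸ h)⟩
        · exact ⟨"efficiency", by simp, (contains_iff_mem_set _ _).mp (heff ▸ h)⟩
        · exact ⟨"waste", by simp, (contains_iff_mem_set _ _).mp (hwas ▸ h)⟩
    have hintt : ((PySem.Set.inter (pvFound n.toList) ["time", "duration"] ≠ []) : Prop) ↔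
        (PySem.Str.isIn "time" n || PySem.Str.isIn "duration" n) = true := by
      rw [inter_ne_nil_iff]
      simp only [List.mem_cons, List.not_mem_nil, Bool.or_eq_true]
      constructor
      · rintro ⟨t, ht, hs⟩
        rcases ht with rfl | rfl | h
        · exact Or.inl (by rw [← htim]; exact (contains_iff_mem_set _ _).mpr hs)
        · exact Or.inr (by rw [← hdur]; exact (contains_iff_mem_set _ _).mpr hs)
        · cases h
      · rintro (h | h)
        · exact ⟨"time", by simp, (contains_iff_mem_set _ _).mp (htim ▸ h)⟩
        · exact ⟨"duration", by simp, (contains_iff_mem_set _ _).mp (hdur ▸ h)⟩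
    have hintc : ((PySem.Set.inter (pvFound n.toList) ["cost", "installation", "isk"] ≠ []) : Prop) ↔
        (PySem.Str.isIn "cost" n || (PySem.Str.isIn "installation" n || PySem.Str.isIn "isk" n)) = true := by
      rw [inter_ne_nil_iff]
      simp only [List.mem_cons, List.not_mem_nil, Bool.or_eq_true]
      constructor
      · rintro ⟨t, ht, hs⟩
        rcases ht with rfl | rfl | rfl | h
        · exact Or.inl (by rw [← hcos]; exact (contains_iff_mem_set _ _).mpr hs)
        · exact Or.inr (Or.inl (by rw [← hins]; exact (contains_iff_mem_set _ _).mpr hs))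
        · exact Or.inr (Or.inr (by rw [← hisk]; exact (contains_iff_mem_set _ _).mpr hs))
        · cases h
      · rintro (h | h | h)
        · exact ⟨"cost", by simp, (contains_iff_mem_set _ _).mp (hcos ▸ h)⟩
        · exact ⟨"installation", by simp, (contains_iff_mem_set _ _).mp (hins ▸ h)⟩
        · exact ⟨"isk", by simp, (contains_iff_mem_set _ _).mp (hisk ▸ h)⟩
    refine congrArg₂ Prod.mk ?_ ?_
    · rw [hman, hinv, hcop, hres, hmat, htim]
      cases PySem.Str.isIn "manufact" n <;>
      cases PySem.Str.isIn "invent" n <;>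
      cases PySem.Str.isIn "copy" n <;>
      cases PySem.Str.isIn "research" n <;>
      cases PySem.Str.isIn "material" n <;>
      cases PySem.Str.isIn "time" n <;> rfl
    · simp only [List.any_cons, List.any_nil, Bool.or_false]
      by_cases h1 : (PySem.Str.isIn "material" n || (PySem.Str.isIn "efficiency" n || PySem.Str.isIn "waste" n)) = true
      · rw [if_pos h1, if_pos (hintm.mpr h1)]
      · rw [if_neg h1, if_neg (fun hc => h1 (hintm.mp hc))]
        by_cases h2 : (PySem.Str.isIn "time" n || PySem.Str.isIn "duration" n) = true
        · rw [if_pos h2, if_pos (hintt.mpr h2)]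
        · rw [if_neg h2, if_neg (fun hc => h2 (hintt.mp hc))]
          by_cases h3 : (PySem.Str.isIn "cost" n || (PySem.Str.isIn "installation" n || PySem.Str.isIn "isk" n)) = true
          · rw [if_pos h3, if_pos (hintc.mpr h3)]
          · rw [if_neg h3, if_neg (fun hc => h3 (hintc.mp hc))]
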